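-- pv_equiv track=rewrite | github.com/juanfdg/JuanFreireCES22 | Aula3/Problem_14_11_1_e.py | bagdiff
-- ===== SOURCE A (Python) =====
-- def bagdiff(xs, ys):
--     """ bagdiff for the first list."""
--     result = []
--     xi = 0
--     yi = 0
--
--     while True:
--         if xi >= len(xs):  # If xs list is finished, we're done
--             return result
--
--         if yi >= len(ys):  # If ys list is finished
--             result.extend(xs[xi:])  # Add the last elements of xs
--             return result  # And we're done
--
--         # Both lists still have items, copy smaller item to result.
--         if xs[xi] < ys[yi]:
--             result.append(xs[xi])
--             xi += 1
--         elif xs[xi] > ys[yi]: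
--             yi += 1
--         else:
--             xi += 1
--             yi += 1
-- ===== SOURCE B (Python) =====
-- def bagdiff(xs, ys):
--     """bagdiff by divide and conquer over ys: each half of ys is processed
--     recursively, threading the cursor into xs; per single y, drain the xs
--     elements below y, then skip one equal element."""
--     n = len(xs)
--
--     def step1(xi, y):
--         out = []
--         while xi < n and xs[xi] < y:
--             out.append(xs[xi])
--             xi += 1
--         if xi < n and xs[xi] == y:
--             xi += 1
--         return out, xi
--
--     def go(lo, hi, xi):
--         if hi <= lo:
--             return [], xi
--         if hi == lo + 1:
--             return step1(xi, ys[lo])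
--         mid = (lo + hi) // 2
--         left, xi = go(lo, mid, xi)
--         right, xi = go(mid, hi, xi)
--         return left + right, xi
--
--     res, xi = go(0, len(ys), 0)
--     return res + xs[xi:]
-- ===== Notes on version B (the rewrite author's own statement) =====
-- stated objective: alternative
-- what changed: Replaces A's single sequential while-True three-way merge loop by a divide-and-conquer recursion that splits ys into halves, threads the xs cursor through the two recursive halves and concatenates their collected outputs; per single y a small helper drains xs elements below y and skips one equal.
import Mathlib
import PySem

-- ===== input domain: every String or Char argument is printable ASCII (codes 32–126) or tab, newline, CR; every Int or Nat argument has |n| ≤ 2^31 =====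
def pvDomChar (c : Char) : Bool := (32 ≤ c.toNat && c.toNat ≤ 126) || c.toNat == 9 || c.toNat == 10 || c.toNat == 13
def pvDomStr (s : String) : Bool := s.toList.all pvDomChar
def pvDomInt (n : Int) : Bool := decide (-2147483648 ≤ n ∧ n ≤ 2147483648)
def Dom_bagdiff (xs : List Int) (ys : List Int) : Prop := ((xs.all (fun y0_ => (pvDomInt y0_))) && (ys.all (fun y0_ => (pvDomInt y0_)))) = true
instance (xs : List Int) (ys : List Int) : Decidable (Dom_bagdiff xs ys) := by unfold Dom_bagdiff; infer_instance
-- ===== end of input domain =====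

-- B replaces A's sequential three-way merge loop by a divide-and-conquer recursion over
-- halves of ys that threads the xs cursor (objective: alternative algorithm, similar cost).

-- ===== PORT A =====
-- A's `while True` loop: state = (result, xi, yi); the fuel argument only makes the loop
-- total (it is always sufficient at the call site); xs[xi:] with xi : Nat is List.drop.
def bagdiffLoop (xs ys : List Int) : Nat → List Int → Nat → Nat → List Int
  | 0, result, _, _ => result
  | fuel + 1, result, xi, yi =>
    if xs.length ≤ xi then result
    else if ys.length ≤ yi then result ++ xs.drop xi
    else if xs.getD xi 0 < ys.getD yi 0 then
      bagdiffLoop xs ys fuel (result ++ [xs.getD xi 0]) (xi + 1) yi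
    else if ys.getD yi 0 < xs.getD xi 0 then
      bagdiffLoop xs ys fuel result xi (yi + 1)
    else
      bagdiffLoop xs ys fuel result (xi + 1) (yi + 1)

def bagdiff (xs : List Int) (ys : List Int) : List Int :=
  bagdiffLoop xs ys (xs.length + ys.length + 1) [] 0 0

-- ===== PORT B =====
-- Source B's inner `while xi < n and xs[xi] < y: out.append(xs[xi]); xi += 1`
-- (fuel is a totality guard only; xs.length is always enough at the call site)
def altInner (xs : List Int) (y : Int) : Nat → List Int → Nat → List Int × Nat
  | 0, out, xi => (out, xi)
  | fuel + 1, out, xi =>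
    if xi < xs.length ∧ xs.getD xi 0 < y then
      altInner xs y fuel (out ++ [xs.getD xi 0]) (xi + 1)
    else (out, xi)

-- Source B's `step1(xi, y)`: drain xs elements below y, then skip one equal element
def altStep1 (xs : List Int) (xi : Nat) (y : Int) : List Int × Nat :=
  if (altInner xs y xs.length [] xi).2 < xs.length ∧
     xs.getD (altInner xs y xs.length [] xi).2 0 = y then
    ((altInner xs y xs.length [] xi).1, (altInner xs y xs.length [] xi).2 + 1)
  else altInner xs y xs.length [] xi

-- Source B's `go(lo, hi, xi)`: divide and conquer over ys[lo:hi], threading the xs cursor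
-- (fuel only makes the halving recursion structural; hi - lo is always enough at the call sites)
def altGo (xs ys : List Int) : Nat → Nat → Nat → Nat → List Int × Nat
  | 0, _, _, xi => ([], xi)
  | fuel + 1, lo, hi, xi =>
    if hi ≤ lo then ([], xi)
    else if hi = lo + 1 then altStep1 xs xi (ys.getD lo 0)
    else
      let mid := (lo + hi) / 2
      let p := altGo xs ys fuel lo mid xi
      let q := altGo xs ys fuel mid hi p.2
      (p.1 ++ q.1, q.2)

def bagdiff_alt (xs : List Int) (ys : List Int) : List Int :=
  (altGo xs ys ys.length 0 ys.length 0).1 ++ xs.drop (altGo xs ys ys.length 0 ys.length 0).2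

-- ===== PRECONDITION & SPEC =====
def Spec_bagdiff (xs : List Int) (ys : List Int) (out : List Int) : Prop := out = bagdiff_alt xs ys
instance (xs : List Int) (ys : List Int) (out : List Int) : Decidable (Spec_bagdiff xs ys out) := by unfold Spec_bagdiff; infer_instance

-- ===== CLAIM (what is proved, stated in full; the proofs are below) =====
def Claim_equal_bagdiff : Prop := ∀ (xs : List Int) (ys : List Int), Dom_bagdiff xs ys → Spec_bagdiff xs ys (bagdiff xs ys)

-- ===== LEMMAS AND PROOFS =====

-- proof-side sequential step: one y processed with an output accumulator
def altStep (xs : List Int) (st : List Int × Nat) (y : Int) : List Int × Nat :=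
  (st.1 ++ (altStep1 xs st.2 y).1, (altStep1 xs st.2 y).2)

lemma altInner_of_neg (xs : List Int) (y : Int) (fuel : Nat) (out : List Int) (xi : Nat)
    (h : ¬ (xi < xs.length ∧ xs.getD xi 0 < y)) :
    altInner xs y fuel out xi = (out, xi) := by
  cases fuel with
  | zero => rfl
  | succ f => rw [altInner, if_neg h]

lemma altInner_hom (xs : List Int) (y : Int) :
    ∀ (fuel : Nat) (a : List Int) (xi : Nat),
      altInner xs y fuel a xi =
        (a ++ (altInner xs y fuel [] xi).1, (altInner xs y fuel [] xi).2) := by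
  intro fuel
  induction fuel with
  | zero => intro a xi; simp [altInner]
  | succ f ih =>
      intro a xi
      rw [altInner, altInner]
      by_cases hc : xi < xs.length ∧ xs.getD xi 0 < y
      · rw [if_pos hc, if_pos hc, ih (a ++ [xs.getD xi 0]), ih ([] ++ [xs.getD xi 0])]
        simp
      · rw [if_neg hc, if_neg hc]; simp

lemma altInner_fuel (xs : List Int) (y : Int) :
    ∀ (fuel fuel' : Nat) (out : List Int) (xi : Nat),
      xs.length - xi ≤ fuel → fuel ≤ fuel' →
      altInner xs y fuel out xi = altInner xs y fuel' out xi := by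
  intro fuel
  induction fuel with
  | zero =>
      intro fuel' out xi h _
      rw [altInner, altInner_of_neg xs y fuel' out xi (fun hc => absurd hc.1 (by omega))]
  | succ f ih =>
      intro fuel' out xi h hle
      obtain ⟨f', rfl⟩ : ∃ f', fuel' = f' + 1 := ⟨fuel' - 1, by omega⟩
      rw [altInner, altInner]
      by_cases hc : xi < xs.length ∧ xs.getD xi 0 < y
      · rw [if_pos hc, if_pos hc]
        exact ih f' (out ++ [xs.getD xi 0]) (xi + 1) (by omega) (by omega)
      · rw [if_neg hc, if_neg hc]

lemma altStep1_exhausted (xs : List Int) (y : Int) (xi : Nat)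
    (h : xs.length ≤ xi) : altStep1 xs xi y = ([], xi) := by
  unfold altStep1
  rw [altInner_of_neg xs y xs.length [] xi (fun hc => absurd hc.1 (by omega))]
  exact if_neg (fun hc => absurd hc.1 (by omega))

lemma altStep_exhausted (xs : List Int) (y : Int) (out : List Int) (xi : Nat)
    (h : xs.length ≤ xi) : altStep xs (out, xi) y = (out, xi) := by
  unfold altStep
  rw [altStep1_exhausted xs y xi h]
  simp

lemma foldl_exhausted (xs : List Int) (l : List Int) (out : List Int) (xi : Nat)
    (h : xs.length ≤ xi) : l.foldl (altStep xs) (out, xi) = (out, xi) := by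
  induction l with
  | nil => rfl
  | cons y l ih => rw [List.foldl_cons, altStep_exhausted xs y out xi h, ih]

lemma altInner_step (xs : List Int) (y : Int) (xi : Nat)
    (h1 : xi < xs.length) (h2 : xs.getD xi 0 < y) :
    altInner xs y xs.length [] xi =
      (xs.getD xi 0 :: (altInner xs y xs.length [] (xi + 1)).1,
       (altInner xs y xs.length [] (xi + 1)).2) := by
  obtain ⟨f, hf⟩ : ∃ f, xs.length = f + 1 := ⟨xs.length - 1, by omega⟩
  conv_lhs => rw [hf, altInner, if_pos (And.intro h1 h2)]
  rw [altInner_hom xs y f ([] ++ [xs.getD xi 0]) (xi + 1),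
      altInner_fuel xs y f xs.length [] (xi + 1) (by omega) (by omega)]
  simp

lemma altStep1_lt (xs : List Int) (y : Int) (xi : Nat)
    (h1 : xi < xs.length) (h2 : xs.getD xi 0 < y) :
    altStep1 xs xi y =
      (xs.getD xi 0 :: (altStep1 xs (xi + 1) y).1, (altStep1 xs (xi + 1) y).2) := by
  unfold altStep1
  rw [altInner_step xs y xi h1 h2]
  by_cases hc : (altInner xs y xs.length [] (xi + 1)).2 < xs.length ∧
      xs.getD (altInner xs y xs.length [] (xi + 1)).2 0 = y
  · rw [if_pos hc, if_pos hc]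
  · rw [if_neg hc, if_neg hc]

lemma altStep_lt (xs : List Int) (y : Int) (out : List Int) (xi : Nat)
    (h1 : xi < xs.length) (h2 : xs.getD xi 0 < y) :
    altStep xs (out, xi) y = altStep xs (out ++ [xs.getD xi 0], xi + 1) y := by
  show (out ++ (altStep1 xs xi y).1, (altStep1 xs xi y).2) = _
  rw [altStep1_lt xs y xi h1 h2]
  simp [altStep]

lemma altStep_gt (xs : List Int) (y : Int) (out : List Int) (xi : Nat)
    (_h1 : xi < xs.length) (h2 : y < xs.getD xi 0) :
    altStep xs (out, xi) y = (out, xi) := by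
  unfold altStep altStep1
  rw [altInner_of_neg xs y xs.length [] xi (by rintro ⟨-, hlt⟩; omega)]
  rw [if_neg (fun hc => absurd (hc.2 : xs.getD xi 0 = y) (by omega))]
  simp

lemma altStep_eq (xs : List Int) (y : Int) (out : List Int) (xi : Nat)
    (h1 : xi < xs.length) (h2 : xs.getD xi 0 = y) :
    altStep xs (out, xi) y = (out, xi + 1) := by
  unfold altStep altStep1
  rw [altInner_of_neg xs y xs.length [] xi (by rintro ⟨-, hlt⟩; omega)]
  rw [if_pos (show (([] : List Int), xi).2 < xs.length ∧
        xs.getD (([] : List Int), xi).2 0 = y from ⟨h1, h2⟩)]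
  simp

-- A's loop equals the sequential left fold of altStep over the rest of ys
lemma loop_eq_fold (xs ys : List Int) :
    ∀ (fuel : Nat) (out : List Int) (xi yi : Nat),
      (xs.length - xi) + (ys.length - yi) < fuel →
      bagdiffLoop xs ys fuel out xi yi =
        ((ys.drop yi).foldl (altStep xs) (out, xi)).1 ++
          xs.drop ((ys.drop yi).foldl (altStep xs) (out, xi)).2 := by
  intro fuel
  induction fuel with
  | zero => intro out xi yi h; omega
  | succ fuel ih =>
      intro out xi yi h
      rw [bagdiffLoop]
      by_cases hx : xs.length ≤ xi
      · rw [if_pos hx, foldl_exhausted xs _ _ _ hx]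
        simp [List.drop_eq_nil_of_le hx]
      · rw [if_neg hx]
        by_cases hy : ys.length ≤ yi
        · rw [if_pos hy, List.drop_eq_nil_of_le hy]
          rfl
        · rw [if_neg hy]
          have hx' : xi < xs.length := by omega
          have hy' : yi < ys.length := by omega
          rw [List.drop_eq_getElem_cons hy', List.foldl_cons, ← List.getD_eq_getElem ys 0 hy']
          by_cases hlt : xs.getD xi 0 < ys.getD yi 0
          · rw [if_pos hlt, altStep_lt xs _ out xi hx' hlt,
                ih (out ++ [xs.getD xi 0]) (xi + 1) yi (by omega),
                List.drop_eq_getElem_cons hy', List.foldl_cons, ← List.getD_eq_getElem ys 0 hy']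
          · rw [if_neg hlt]
            by_cases hgt : ys.getD yi 0 < xs.getD xi 0
            · rw [if_pos hgt, altStep_gt xs _ out xi hx' hgt]
              exact ih out xi (yi + 1) (by omega)
            · rw [if_neg hgt, altStep_eq xs _ out xi hx' (by omega)]
              exact ih out (xi + 1) (yi + 1) (by omega)

-- the fold of altStep accumulates its output by append
lemma foldl_altStep_hom (xs : List Int) :
    ∀ (l : List Int) (a : List Int) (xi : Nat),
      l.foldl (altStep xs) (a, xi) =
        (a ++ (l.foldl (altStep xs) ([], xi)).1, (l.foldl (altStep xs) ([], xi)).2) := by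
  intro l
  induction l with
  | nil => intro a xi; simp
  | cons y l ih =>
      intro a xi
      rw [List.foldl_cons, List.foldl_cons]
      have e1 : altStep xs (a, xi) y = (a ++ (altStep1 xs xi y).1, (altStep1 xs xi y).2) := rfl
      have e2 : altStep xs ([], xi) y = ((altStep1 xs xi y).1, (altStep1 xs xi y).2) := by
        simp [altStep]
      rw [e1, e2, ih (a ++ (altStep1 xs xi y).1), ih ((altStep1 xs xi y).1)]
      simp

-- B's divide and conquer equals the sequential left fold over ys[lo:hi]
lemma go_eq_fold (xs ys : List Int) :
    ∀ (k lo hi xi : Nat), hi - lo ≤ k → hi ≤ ys.length →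
      altGo xs ys k lo hi xi = ((ys.drop lo).take (hi - lo)).foldl (altStep xs) ([], xi) := by
  intro k
  induction k with
  | zero =>
      intro lo hi xi hk _
      rw [altGo]
      have : hi - lo = 0 := by omega
      simp [this]
  | succ k ih =>
      intro lo hi xi hk hhi
      rw [altGo]
      by_cases h0 : hi ≤ lo
      · rw [if_pos h0]
        have : hi - lo = 0 := by omega
        simp [this]
      · rw [if_neg h0]
        by_cases h1 : hi = lo + 1
        · rw [if_pos h1]
          have hlo : lo < ys.length := by omega
          have hdrop : (ys.drop lo).take (hi - lo) = [ys.getD lo 0] := by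
            rw [h1, List.getD_eq_getElem ys 0 hlo]
            simp [List.take_one, List.head?_drop, List.getElem?_eq_getElem hlo]
          rw [hdrop, List.foldl_cons, List.foldl_nil]
          show altStep1 xs xi (ys.getD lo 0) = altStep xs ([], xi) (ys.getD lo 0)
          unfold altStep
          simp
        · rw [if_neg h1]
          show ((altGo xs ys k lo ((lo + hi) / 2) xi).1 ++
              (altGo xs ys k ((lo + hi) / 2) hi (altGo xs ys k lo ((lo + hi) / 2) xi).2).1,
              (altGo xs ys k ((lo + hi) / 2) hi (altGo xs ys k lo ((lo + hi) / 2) xi).2).2) = _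
          have hmid1 : lo < (lo + hi) / 2 := by omega
          have hmid2 : (lo + hi) / 2 < hi := by omega
          rw [ih lo ((lo + hi) / 2) xi (by omega) (by omega),
              ih ((lo + hi) / 2) hi _ (by omega) hhi]
          have hsplit : (ys.drop lo).take (hi - lo) =
              (ys.drop lo).take ((lo + hi) / 2 - lo) ++
                (ys.drop ((lo + hi) / 2)).take (hi - (lo + hi) / 2) := by
            have h2 : hi - lo = ((lo + hi) / 2 - lo) + (hi - (lo + hi) / 2) := by omega
            have h3 : (ys.drop lo).drop ((lo + hi) / 2 - lo) = ys.drop ((lo + hi) / 2) := by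
              rw [List.drop_drop]
              congr 1
              omega
            rw [h2, List.take_add, h3]
          rw [hsplit, List.foldl_append]
          rw [foldl_altStep_hom xs ((ys.drop ((lo + hi) / 2)).take (hi - (lo + hi) / 2))
              (((ys.drop lo).take ((lo + hi) / 2 - lo)).foldl (altStep xs) ([], xi)).1
              (((ys.drop lo).take ((lo + hi) / 2 - lo)).foldl (altStep xs) ([], xi)).2]

-- ===== VERDICT (by name: the statement is the Claim_ definition above) =====
theorem bagdiff_spec : Claim_equal_bagdiff := by
  intro xs ys _
  unfold Spec_bagdiff bagdiff bagdiff_alt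
  rw [loop_eq_fold xs ys (xs.length + ys.length + 1) [] 0 0 (by omega),
      go_eq_fold xs ys ys.length 0 ys.length 0 (by omega) (by omega)]
  simp
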